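-- pv_equiv track=rewrite | github.com/denisefavila/training | interview/interview/interesting_pairs.py | interesting_pairs
-- ===== SOURCE A (Python) =====
-- def interesting_pairs(arr, target):
--     """
--
--     Given an array of integers arr, an integer sumVal, the task is to pair the elements
--     in the arr into interesting pairs. Find the number of interesting pairs in the array .
--     An unordered pair (i,j) is defined to be
--     interesting if | arr[i] - arr[j] | + | arr[i] + arr[j] | = sumVal (i.e,
--     the sum of absolute difference and absolute sum at the values in respective indices
--     is equal to sumVal). The goal is to find the number of interesting pairs in the array.
--
--     arr = [1,4,-1,2] ---> [-1,1,2,4]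
--
--     | x -  y | + |x + y|
--
--     case1: x >= 0 and y >= 0
--         2x
--
--     case1: x <= 0 and y <= 0
--         2x
--
--
--
--     """
--     count = 0
--     n = len(arr)
--     for i in range(n):
--         for j in range(i + 1, n):
--             if abs(arr[i] - arr[j]) + abs(arr[i] + arr[j]) == target:
--                 count += 1
--     return count
-- ===== SOURCE B (Python) =====
-- def interesting_pairs(arr, target):
--     # |a-b| + |a+b| == 2*max(|a|,|b|), so count pairs whose larger absolute
--     # value equals target/2, in one pass with running counters.
--     if target < 0 or target % 2 != 0:
--         return 0
--     m = target // 2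
--     eq = lt = ans = 0
--     for x in arr:
--         ax = abs(x)
--         if ax == m:
--             ans += eq + lt
--             eq += 1
--         elif ax < m:
--             ans += eq
--             lt += 1
--     return ans
-- ===== Notes on version B (the rewrite author's own statement) =====
-- stated objective: faster
-- what changed: Replaces the O(n^2) double loop testing |a-b|+|a+b|==target on every pair by a single pass that uses the identity |a-b|+|a+b| = 2*max(|a|,|b|): after rejecting negative or odd targets it counts pairs whose larger absolute value equals target//2 with two running counters.
import Mathlib
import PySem

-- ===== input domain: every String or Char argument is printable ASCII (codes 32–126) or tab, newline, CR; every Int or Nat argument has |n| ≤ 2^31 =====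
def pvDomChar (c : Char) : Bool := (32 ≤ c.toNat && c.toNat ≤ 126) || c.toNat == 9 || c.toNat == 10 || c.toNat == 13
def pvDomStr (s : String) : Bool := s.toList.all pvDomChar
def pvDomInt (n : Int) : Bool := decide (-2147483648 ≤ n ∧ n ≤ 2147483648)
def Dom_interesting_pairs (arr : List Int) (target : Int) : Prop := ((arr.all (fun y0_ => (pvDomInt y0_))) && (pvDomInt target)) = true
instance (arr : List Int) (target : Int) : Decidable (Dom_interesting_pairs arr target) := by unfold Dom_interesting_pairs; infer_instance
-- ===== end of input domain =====

-- B replaces A's quadratic double loop by a single pass using the identity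
-- |a-b| + |a+b| = 2*max(|a|,|b|): it counts, with running counters, the pairs
-- whose larger absolute value is target/2 (objective: faster, O(n) vs O(n^2)).

-- ===== PORT A =====
def interesting_pairs (arr : List Int) (target : Int) : Int :=
  -- count = 0; n = len(arr); for i in range(n): for j in range(i+1, n): if |arr[i]-arr[j]|+|arr[i]+arr[j]| == target: count += 1
  let n : Int := (arr.length : Int)
  (PySem.List.pyRange 0 n 1).foldl
    (fun count i =>
      (PySem.List.pyRange (i + 1) n 1).foldl
        (fun count j =>
          if |PySem.List.pyGetD arr i 0 - PySem.List.pyGetD arr j 0| +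
             |PySem.List.pyGetD arr i 0 + PySem.List.pyGetD arr j 0| = target
          then count + 1 else count)
        count)
    0

-- ===== PORT B =====
def interesting_pairs_alt (arr : List Int) (target : Int) : Int :=
  if target < 0 ∨ PySem.Int.mod target 2 ≠ 0 then 0
  else
    let m : Int := PySem.Int.floordiv target 2
    -- state (eq, lt, ans) over one pass
    (arr.foldl
      (fun (s : Int × Int × Int) x =>
        if |x| = m then (s.1 + 1, s.2.1, s.2.2 + s.1 + s.2.1)
        else if |x| < m then (s.1, s.2.1 + 1, s.2.2 + s.1)
        else s)
      (0, 0, 0)).2.2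

-- ===== PRECONDITION & SPEC =====
def Spec_interesting_pairs (arr : List Int) (target : Int) (out : Int) : Prop := out = interesting_pairs_alt arr target
instance (arr : List Int) (target : Int) (out : Int) : Decidable (Spec_interesting_pairs arr target out) := by unfold Spec_interesting_pairs; infer_instance

-- ===== CLAIM (what is proved, stated in full; the proofs are below) =====
def Claim_equal_interesting_pairs : Prop := ∀ (arr : List Int) (target : Int), Dom_interesting_pairs arr target → Spec_interesting_pairs arr target (interesting_pairs arr target)

-- ===== LEMMAS AND PROOFS =====

-- the count of interesting pairs, structurally (head against the tail, then the tail)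
def pairCnt (t : Int) : List Int → Int
  | [] => 0
  | x :: r => ((r.countP (fun y => decide (|x - y| + |x + y| = t))) : Int) + pairCnt t r

-- the key algebraic identity behind B
lemma sum_abs_eq_two_max (x y : Int) : |x - y| + |x + y| = 2 * max |x| |y| := by
  rcases abs_cases (x - y) with ⟨h1, _⟩ | ⟨h1, _⟩ <;>
  rcases abs_cases (x + y) with ⟨h2, _⟩ | ⟨h2, _⟩ <;>
  rcases abs_cases x with ⟨h3, _⟩ | ⟨h3, _⟩ <;>
  rcases abs_cases y with ⟨h4, _⟩ | ⟨h4, _⟩ <;>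
  rcases le_total |x| |y| with h | h <;>
  simp only [max_eq_right h, max_eq_left h] <;> omega

lemma pyRange_one_nil {a b : Int} (h : b ≤ a) : PySem.List.pyRange a b 1 = [] := by
  simp [PySem.List.pyRange]; omega

-- A's inner loop counts matches among the tail arr[a:]
lemma innerA (P : Int → Prop) [DecidablePred P] (arr : List Int) (a : Nat) (c : Int) :
    (PySem.List.pyRange (a : Int) (arr.length : Int) 1).foldl
      (fun cnt j => if P (PySem.List.pyGetD arr j 0) then cnt + 1 else cnt) c
    = c + ((arr.drop a).countP (fun y => decide (P y)) : Int) := by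
  induction hn : arr.length - a generalizing a c with
  | zero =>
    rw [pyRange_one_nil (by omega), List.drop_eq_nil_of_le (by omega)]
    simp
  | succ k ih =>
    have ha : a < arr.length := by omega
    rw [PySem.List.pyRange_one_cons (by exact_mod_cast ha), List.foldl_cons]
    have : ((a : Int) + 1) = ((a + 1 : Nat) : Int) := by push_cast; ring
    rw [this, ih (a + 1) _ (by omega)]
    rw [List.drop_eq_getElem_cons ha, List.countP_cons]
    rw [PySem.List.pyGetD_natCast, List.getD_eq_getElem arr 0 ha]
    by_cases hP : P arr[a] <;> simp [hP] <;> push_cast <;> ring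

-- A's double loop over arr[a:] is the structural pair count on arr[a:]
lemma outerA (t : Int) (arr : List Int) (a : Nat) (c : Int) :
    (PySem.List.pyRange (a : Int) (arr.length : Int) 1).foldl
      (fun count i =>
        (PySem.List.pyRange (i + 1) (arr.length : Int) 1).foldl
          (fun count j =>
            if |PySem.List.pyGetD arr i 0 - PySem.List.pyGetD arr j 0| +
               |PySem.List.pyGetD arr i 0 + PySem.List.pyGetD arr j 0| = t
            then count + 1 else count)
          count)
      c
    = c + pairCnt t (arr.drop a) := by
  induction hn : arr.length - a generalizing a c with
  | zero =>
    rw [pyRange_one_nil (by omega), List.drop_eq_nil_of_le (by omega)]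
    simp [pairCnt]
  | succ k ih =>
    have ha : a < arr.length := by omega
    rw [PySem.List.pyRange_one_cons (by exact_mod_cast ha), List.foldl_cons]
    have hcast : ((a : Int) + 1) = ((a + 1 : Nat) : Int) := by push_cast; ring
    rw [hcast, innerA (fun y => |PySem.List.pyGetD arr (a : Int) 0 - y| + |PySem.List.pyGetD arr (a : Int) 0 + y| = t) arr (a + 1) c]
    rw [ih (a + 1) _ (by omega)]
    rw [List.drop_eq_getElem_cons ha]
    show _ = c + (((arr.drop (a+1)).countP (fun y => decide (|arr[a] - y| + |arr[a] + y| = t)) : Int) + pairCnt t (arr.drop (a+1)))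
    rw [PySem.List.pyGetD_natCast, List.getD_eq_getElem arr 0 ha]
    ring

lemma A_eq_pairCnt (arr : List Int) (t : Int) : interesting_pairs arr t = pairCnt t arr := by
  have := outerA t arr 0 0
  simpa [interesting_pairs] using this

-- the predicate of pairCnt, rephrased through the identity (m = t/2)
lemma cond_iff (x y m : Int) : (|x - y| + |x + y| = 2 * m) ↔ max |x| |y| = m := by
  rw [sum_abs_eq_two_max]; omega

-- pairCnt vanishes for negative or odd targets
lemma pairCnt_eq_zero (t : Int) (h : t < 0 ∨ ¬ (2 ∣ t)) (l : List Int) : pairCnt t l = 0 := by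
  induction l with
  | nil => rfl
  | cons x r ih =>
    rw [pairCnt, ih, List.countP_eq_zero.mpr]
    · simp
    · intro y _
      simp only [decide_eq_true_eq]
      rw [sum_abs_eq_two_max]
      rcases h with h | h
      · have : (0 : Int) ≤ max |x| |y| := le_max_of_le_left (abs_nonneg x)
        omega
      · intro he; exact h ⟨max |x| |y|, he.symm⟩

-- |y| ≤ m splits into |y| = m and |y| < m
lemma countP_le_split (m : Int) (l : List Int) :
    l.countP (fun y => decide (|y| ≤ m))
    = l.countP (fun y => decide (|y| = m)) + l.countP (fun y => decide (|y| < m)) := by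
  induction l with
  | nil => rfl
  | cons x r ih =>
    simp only [List.countP_cons, ih]
    have e1 : ∀ (p : Prop) [Decidable p], p → decide p = true := fun p _ hp => by simp [hp]
    have e2 : ∀ (p : Prop) [Decidable p], ¬ p → decide p = false := fun p _ hp => by simp [hp]
    rcases lt_trichotomy |x| m with h | h | h
    · rw [e1 _ (le_of_lt h), e2 _ (ne_of_lt h), e1 _ h]
      simp only [eq_self_iff_true, Bool.false_eq_true, if_true, if_false]; omega
    · rw [e1 _ (le_of_eq h), e1 _ h, e2 _ (by omega : ¬ |x| < m)]
      simp only [eq_self_iff_true, Bool.false_eq_true, if_true, if_false]; omega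
    · rw [e2 _ (not_le.mpr h), e2 _ (ne_of_gt h), e2 _ (not_lt.mpr (le_of_lt h))]
      simp only [eq_self_iff_true, Bool.false_eq_true, if_true, if_false]; omega

-- invariant of B's single pass: the final answer adds the cross pairs with the
-- already-seen counters (e, lt) plus the internal pair count of the rest
lemma foldB (m : Int) (l : List Int) (e lt ans : Int) :
    (l.foldl
      (fun (s : Int × Int × Int) x =>
        if |x| = m then (s.1 + 1, s.2.1, s.2.2 + s.1 + s.2.1)
        else if |x| < m then (s.1, s.2.1 + 1, s.2.2 + s.1)
        else s)
      (e, lt, ans)).2.2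
    = ans + e * ((l.countP (fun y => decide (|y| = m)) : Int) + (l.countP (fun y => decide (|y| < m)) : Int))
        + lt * (l.countP (fun y => decide (|y| = m)) : Int)
        + pairCnt (2 * m) l := by
  induction l generalizing e lt ans with
  | nil => simp [pairCnt]
  | cons x r ih =>
    rw [List.foldl_cons, pairCnt,
      List.countP_congr (fun y _ => by
        simp only [decide_eq_true_eq]; exact cond_iff x y m :
        ∀ y ∈ r, decide (|x - y| + |x + y| = 2 * m) = true ↔ decide (max |x| |y| = m) = true)]
    rcases lt_trichotomy |x| m with h | h | h
    · -- |x| < m : head pairs with the equal-|·| elements of r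
      rw [if_neg (by omega), if_pos h, ih]
      rw [List.countP_congr (fun y _ => by
        simp only [decide_eq_true_eq]
        constructor
        · intro hm; rcases max_cases |x| |y| with ⟨h1, h2⟩ | ⟨h1, h2⟩ <;> omega
        · intro hm; rw [max_eq_right (by omega)]; exact hm :
        ∀ y ∈ r, decide (max |x| |y| = m) = true ↔ decide (|y| = m) = true)]
      simp only [List.countP_cons]
      have hx1 : decide (|x| = m) = false := by simp; omega
      have hx2 : decide (|x| < m) = true := by simp [h]
      rw [hx1, hx2]
      simp only [eq_self_iff_true, Bool.false_eq_true, if_true, if_false]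
      push_cast; ring
    · -- |x| = m : head pairs with every |·| ≤ m element of r
      rw [if_pos h, ih]
      rw [List.countP_congr (fun y _ => by
        simp only [decide_eq_true_eq]
        constructor
        · intro hm; rcases max_cases |x| |y| with ⟨h1, h2⟩ | ⟨h1, h2⟩ <;> omega
        · intro hm; rcases max_cases |x| |y| with ⟨h1, h2⟩ | ⟨h1, h2⟩ <;> omega :
        ∀ y ∈ r, decide (max |x| |y| = m) = true ↔ decide (|y| ≤ m) = true), countP_le_split]
      simp only [List.countP_cons]
      have hx1 : decide (|x| = m) = true := by simp [h]
      have hx2 : decide (|x| < m) = false := by simp; omega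
      rw [hx1, hx2]
      simp only [eq_self_iff_true, Bool.false_eq_true, if_true, if_false]
      push_cast; ring
    · -- |x| > m : head pairs with nothing
      rw [if_neg (by omega), if_neg (by omega), ih]
      have hc : (r.countP (fun y => decide (max |x| |y| = m))) = 0 := by
        rw [List.countP_eq_zero]
        intro y _
        simp only [decide_eq_true_eq]
        rcases max_cases |x| |y| with ⟨h1, h2⟩ | ⟨h1, h2⟩ <;> omega
      simp only [List.countP_cons]
      have hx1 : decide (|x| = m) = false := by simp; omega
      have hx2 : decide (|x| < m) = false := by simp; omega
      rw [hc, hx1, hx2]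
      simp only [eq_self_iff_true, Bool.false_eq_true, if_true, if_false]
      push_cast; ring

-- ===== VERDICT (by name: the statement is the Claim_ definition above) =====
theorem interesting_pairs_spec : Claim_equal_interesting_pairs := by
  intro arr target _
  unfold Spec_interesting_pairs
  rw [A_eq_pairCnt]
  unfold interesting_pairs_alt
  by_cases hbad : target < 0 ∨ PySem.Int.mod target 2 ≠ 0
  · rw [if_pos hbad]
    refine pairCnt_eq_zero target ?_ arr
    rcases hbad with h | h
    · exact Or.inl h
    · exact Or.inr (fun hd => h ((PySem.Int.mod_eq_zero_iff_dvd target 2).mpr hd))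
  · rw [if_neg hbad]
    push_neg at hbad
    obtain ⟨hnn, hmod⟩ := hbad
    have hdvd : 2 ∣ target := (PySem.Int.mod_eq_zero_iff_dvd target 2).mp hmod
    have ht : target = 2 * PySem.Int.floordiv target 2 := by
      have := PySem.Int.floordiv_mul_add_mod target 2
      omega
    rw [foldB (PySem.Int.floordiv target 2) arr 0 0 0]
    rw [← ht]
    ring
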